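-- pv_equiv track=rewrite | github.com/jonasleitner/adcgen | sympy_adc/indices.py | split_idx_string
-- ===== SOURCE A (Python) =====
-- def split_idx_string(str_tosplit):
--     """Splits an index string of the form ij12a3b in a list [i,j12,a3,b]."""
--     splitted = []
--     temp = []
--     for i, idx in enumerate(str_tosplit):
--         temp.append(idx)
--         try:
--             if str_tosplit[i+1].isdigit():
--                 continue
--             else:
--                 splitted.append("".join(temp))
--                 temp.clear()
--         except IndexError:
--             splitted.append("".join(temp))
--     return splitted
-- ===== SOURCE B (Python) =====
-- import re
--
-- def split_idx_string(str_tosplit):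
--     """Splits an index string of the form ij12a3b in a list [i,j12,a3,b]."""
--     return re.findall(r'.\d*', str_tosplit, re.DOTALL)
-- ===== Notes on version B (the rewrite author's own statement) =====
-- stated objective: idiomatic
-- what changed: Replaces the manual char-by-char loop with accumulator, lookahead and IndexError sentinel by a single regex scan re.findall(r'.\d*', s, re.DOTALL): each token is one character plus its trailing run of digits.
import Mathlib
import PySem

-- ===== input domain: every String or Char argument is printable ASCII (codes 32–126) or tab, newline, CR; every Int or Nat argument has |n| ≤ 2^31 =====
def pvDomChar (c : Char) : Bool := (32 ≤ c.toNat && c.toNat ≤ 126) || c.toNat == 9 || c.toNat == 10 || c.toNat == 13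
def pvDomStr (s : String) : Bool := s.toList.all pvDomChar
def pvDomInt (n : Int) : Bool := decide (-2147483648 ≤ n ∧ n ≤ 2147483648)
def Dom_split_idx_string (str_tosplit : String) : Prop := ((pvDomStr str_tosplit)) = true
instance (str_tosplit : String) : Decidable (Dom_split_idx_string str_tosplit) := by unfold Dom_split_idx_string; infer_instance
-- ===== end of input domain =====

-- B replaces A's manual loop with lookahead/IndexError sentinel by a single regex scan
-- (one char + its trailing digit run per token); same output, same cost (objective: idiomatic).

-- ===== PORT A =====
-- the loop body of A: state = (splitted, temp); lookahead str_tosplit[i+1] (IndexError → append, keep temp)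
def pvAStep (cs : List Char) (st : List String × List Char) (p : Int × Char) : List String × List Char :=
  let temp := st.2 ++ [p.2]
  match PySem.List.pyGet? cs (p.1 + 1) with
  | some c => if PySem.Chars.isdigit c then (st.1, temp)
              else (st.1 ++ [String.mk temp], [])
  | none => (st.1 ++ [String.mk temp], temp)   -- except IndexError: append; temp not cleared (loop ends)

def split_idx_string (str_tosplit : String) : List String :=
  let cs := str_tosplit.toList
  ((PySem.List.enumerate cs 0).foldl (pvAStep cs) ([], [])).1

-- ===== PORT B =====
-- port of Source B's re.findall(r'.\d*', s, re.DOTALL): each match is one character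
-- followed by the maximal run of digits (greedy \d*) — this recursion is exactly that scan.
def pvScan : List Char → List String
  | [] => []
  | c :: rest =>
      String.mk (c :: rest.takeWhile PySem.Chars.isdigit) :: pvScan (rest.dropWhile PySem.Chars.isdigit)
termination_by l => l.length
decreasing_by
  simpa using Nat.lt_succ_of_le (List.length_dropWhile_le _ _)

def split_idx_string_alt (str_tosplit : String) : List String :=
  pvScan str_tosplit.toList

-- ===== PRECONDITION & SPEC =====
def Spec_split_idx_string (str_tosplit : String) (out : List String) : Prop := out = split_idx_string_alt str_tosplit
instance (str_tosplit : String) (out : List String) : Decidable (Spec_split_idx_string str_tosplit out) := by unfold Spec_split_idx_string; infer_instance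

-- ===== CLAIM (what is proved, stated in full; the proofs are below) =====
def Claim_equal_split_idx_string : Prop := ∀ (str_tosplit : String), Dom_split_idx_string str_tosplit → Spec_split_idx_string str_tosplit (split_idx_string str_tosplit)

-- ===== LEMMAS AND PROOFS =====

-- abstract form of A's fold on the remaining suffix (the lookahead becomes the suffix's second element)
def pvG (temp : List Char) : List Char → List String
  | [] => []
  | c :: rest =>
      match rest.head? with
      | some d => if PySem.Chars.isdigit d then pvG (temp ++ [c]) rest
                  else String.mk (temp ++ [c]) :: pvG [] rest
      | none => [String.mk (temp ++ [c])]

theorem pvG_cons (temp : List Char) (c : Char) (rest : List Char) :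
    pvG temp (c :: rest) =
      match rest.head? with
      | some d => if PySem.Chars.isdigit d then pvG (temp ++ [c]) rest
                  else String.mk (temp ++ [c]) :: pvG [] rest
      | none => [String.mk (temp ++ [c])] := rfl

theorem pvScan_cons (c : Char) (rest : List Char) :
    pvScan (c :: rest) =
      String.mk (c :: rest.takeWhile PySem.Chars.isdigit) :: pvScan (rest.dropWhile PySem.Chars.isdigit) := by
  rw [pvScan]

theorem pvFold_eq_pvG (cs : List Char) :
    ∀ (t : List Char) (i : Nat), cs.drop i = t →
    ∀ (acc : List String) (temp : List Char),
      ((PySem.List.enumerate t (i : Int)).foldl (pvAStep cs) (acc, temp)).1 = acc ++ pvG temp t := by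
  intro t
  induction t with
  | nil => intro i _ acc temp; simp [PySem.List.enumerate_nil, pvG]
  | cons c rest ih =>
    intro i hdrop acc temp
    have hget : PySem.List.pyGet? cs ((i : Int) + 1) = rest.head? := by
      have h1 : (cs.drop i)[1]? = cs[i + 1]? := by rw [List.getElem?_drop]
      rw [hdrop] at h1
      have hc : ((i : Int) + 1) = ((i + 1 : Nat) : Int) := by push_cast; ring
      rw [hc, PySem.List.pyGet?_natCast, ← h1]
      cases rest <;> rfl
    have hdrop' : cs.drop (i + 1) = rest := by
      have h2 : cs.drop (i + 1) = (cs.drop i).drop 1 := by rw [List.drop_drop, Nat.add_comm]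
      rw [h2, hdrop]; rfl
    have hcast : ((i : Int) + 1) = ((i + 1 : Nat) : Int) := by push_cast; ring
    rw [PySem.List.enumerate_cons, List.foldl_cons, pvG_cons]
    cases rest with
    | nil =>
      simp only [pvAStep, hget, List.head?_nil]
      simp [PySem.List.enumerate_nil]
    | cons d rest2 =>
      simp only [pvAStep, hget, List.head?_cons]
      by_cases hd : PySem.Chars.isdigit d = true
      · simp only [hd, if_true]
        rw [hcast]
        exact ih (i + 1) hdrop' acc (temp ++ [c])
      · simp only [Bool.not_eq_true] at hd
        simp only [hd, Bool.false_eq_true, if_false]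
        rw [hcast, ih (i + 1) hdrop' (acc ++ [String.mk (temp ++ [c])]) []]
        simp

theorem pvG_eq_scan : ∀ (t : List Char) (pre : List Char) (c : Char),
    pvG pre (c :: t) =
      String.mk (pre ++ c :: t.takeWhile PySem.Chars.isdigit) :: pvScan (t.dropWhile PySem.Chars.isdigit) := by
  intro t
  induction t with
  | nil => intro pre c; simp [pvG_cons, pvScan]
  | cons d rest ih =>
    intro pre c
    rw [pvG_cons]
    by_cases hd : PySem.Chars.isdigit d = true
    · simp only [List.head?_cons, hd, if_true]
      rw [ih (pre ++ [c]) d]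
      simp [hd]
    · simp only [Bool.not_eq_true] at hd
      simp only [List.head?_cons, hd, Bool.false_eq_true, if_false]
      rw [ih [] d]
      simp [hd, pvScan_cons]

-- ===== VERDICT (by name: the statement is the Claim_ definition above) =====
theorem split_idx_string_spec : Claim_equal_split_idx_string := by
  intro s _
  unfold Spec_split_idx_string split_idx_string split_idx_string_alt
  have h := pvFold_eq_pvG s.toList s.toList 0 (by simp) [] []
  simp only [Nat.cast_zero] at h
  rw [h]
  cases hs : s.toList with
  | nil => simp [pvG, pvScan]
  | cons c rest => rw [pvG_eq_scan rest [] c]; simp [pvScan_cons]
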